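-- pv_equiv track=rewrite | github.com/plss12/pyplAI | Juegos/Minimax-MCTS/Super 3 Raya.py | evalua_tablero
-- ===== SOURCE A (Python) =====
-- def evalua_tablero(tablero, jugador):
--     contadorPosibles3 = 0
--     contadorPosibles3Enemigos = 0
--     lineas = (([0,0],[0,1],[0,2]),([1,0],[1,1],[1,2]),([2,0],[2,1],[2,2]),([0,0],[1,0],[2,0]),([0,1],[1,1],[2,1]),([0,2],[1,2],[2,2]),([0,0],[1,1],[2,2]),([0,2],[1,1],[2,0]))
--     combinacionesUno=([0,1,2],[1,2,0],[2,0,1])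
--     for linea in lineas:
--         for combinacion in combinacionesUno:
--             x1 = linea[combinacion[0]][0]
--             y1 = linea[combinacion[0]][1]
--             x2 = linea[combinacion[1]][0]
--             y2 = linea[combinacion[1]][1]
--             x3 = linea[combinacion[2]][0]
--             y3 = linea[combinacion[2]][1]
--             if tablero[x1][y1]==tablero[x2][y2] == jugador and tablero[x3][y3] == 0:
--                 contadorPosibles3+=1
--             elif tablero[x1][y1]==tablero[x2][y2] == 3-jugador and tablero[x3][y3] == 0:
--                 contadorPosibles3Enemigos+=1
--     return (contadorPosibles3 - contadorPosibles3Enemigos)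
-- ===== SOURCE B (Python) =====
-- _LINEAS = (((0, 0), (0, 1), (0, 2)), ((1, 0), (1, 1), (1, 2)), ((2, 0), (2, 1), (2, 2)),
--            ((0, 0), (1, 0), (2, 0)), ((0, 1), (1, 1), (2, 1)), ((0, 2), (1, 2), (2, 2)),
--            ((0, 0), (1, 1), (2, 2)), ((0, 2), (1, 1), (2, 0)))
--
--
-- def _build_through():
--     # for each cell, the list of lines through it, each as the pair of OTHER cells in cyclic order
--     through = {}
--     for linea in _LINEAS:
--         for k in range(3):
--             through.setdefault(linea[k], []).append((linea[(k + 1) % 3], linea[(k + 2) % 3]))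
--     return sorted(through.items())
--
--
-- _THROUGH = _build_through()
--
--
-- def evalua_tablero(tablero, jugador):
--     score = 0
--     for (x, y), others in _THROUGH:
--         if tablero[x][y] == 0:
--             for (px, py), (qx, qy) in others:
--                 u = tablero[px][py]
--                 v = tablero[qx][qy]
--                 if u == jugador and v == jugador:
--                     score += 1
--                 elif u == 3 - jugador and v == 3 - jugador:
--                     score -= 1
--     return score
-- ===== Notes on version B (the rewrite author's own statement) =====
-- stated objective: alternative
-- what changed: A scans 8 lines x 3 rotations of each line; B precomputes, for each of the 9 cells, the lines through it (pairs of other cells) and scans the cells, scoring a line only at its empty cell into a single signed accumulator.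
import Mathlib
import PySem

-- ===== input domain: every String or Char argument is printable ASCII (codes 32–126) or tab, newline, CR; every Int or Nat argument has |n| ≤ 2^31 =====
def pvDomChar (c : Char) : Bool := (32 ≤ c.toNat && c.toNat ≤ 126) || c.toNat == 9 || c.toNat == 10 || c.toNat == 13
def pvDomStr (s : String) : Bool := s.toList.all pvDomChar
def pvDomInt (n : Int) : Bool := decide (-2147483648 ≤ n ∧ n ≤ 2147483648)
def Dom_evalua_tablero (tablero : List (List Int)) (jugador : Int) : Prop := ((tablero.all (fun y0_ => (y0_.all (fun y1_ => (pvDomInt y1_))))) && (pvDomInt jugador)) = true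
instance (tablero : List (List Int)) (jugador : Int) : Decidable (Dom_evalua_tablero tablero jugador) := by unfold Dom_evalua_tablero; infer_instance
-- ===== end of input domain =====

-- B changes the decomposition: instead of A's loop over 8 lines × 3 rotations of each line,
-- B precomputes the lines through each of the 9 cells and scans the cells, scoring only empty
-- ones (objective: alternative decomposition; same cost). Both Pythons index tablero[0..2][0..2]
-- directly, so both raise IndexError on boards smaller than 3×3; Pre_ excludes exactly those.

-- ===== PORT A =====
-- cell access tablero[x][y]: under Pre_ all indices used (literals 0..2) are in range, so the
-- `.getD` defaults are never reached; exact there.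
def pvCell (t : List (List Int)) (p : Int × Int) : Int :=
  (PySem.List.pyGet? ((PySem.List.pyGet? t p.1).getD []) p.2).getD 0

def pvLineas : List (List (Int × Int)) :=
  [[(0,0),(0,1),(0,2)], [(1,0),(1,1),(1,2)], [(2,0),(2,1),(2,2)],
   [(0,0),(1,0),(2,0)], [(0,1),(1,1),(2,1)], [(0,2),(1,2),(2,2)],
   [(0,0),(1,1),(2,2)], [(0,2),(1,1),(2,0)]]

def pvCombinacionesUno : List (List Nat) := [[0,1,2],[1,2,0],[2,0,1]]

-- one body of A's inner loop: linea[combinacion[k]] (indices are literal and in range, getD exact)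
def pvStepA (t : List (List Int)) (j : Int) (acc : Int × Int)
    (linea : List (Int × Int)) (comb : List Nat) : Int × Int :=
  let c1 := linea.getD (comb.getD 0 0) (0,0)
  let c2 := linea.getD (comb.getD 1 0) (0,0)
  let c3 := linea.getD (comb.getD 2 0) (0,0)
  if pvCell t c1 = pvCell t c2 ∧ pvCell t c2 = j ∧ pvCell t c3 = 0 then
    (acc.1 + 1, acc.2)
  else if pvCell t c1 = pvCell t c2 ∧ pvCell t c2 = 3 - j ∧ pvCell t c3 = 0 then
    (acc.1, acc.2 + 1)
  else acc

def evalua_tablero (tablero : List (List Int)) (jugador : Int) : Int :=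
  let r := pvLineas.foldl
    (fun acc linea => pvCombinacionesUno.foldl
      (fun acc comb => pvStepA tablero jugador acc linea comb) acc)
    (0, 0)
  r.1 - r.2

-- ===== PORT B =====
-- literal value of Source B's module-level _THROUGH (built once from _LINEAS): each cell with the
-- lines through it, each line as the pair of OTHER cells in cyclic order
def pvThrough : List ((Int × Int) × List ((Int × Int) × (Int × Int))) :=
  [((0,0), [((0,1),(0,2)), ((1,0),(2,0)), ((1,1),(2,2))]),
   ((0,1), [((0,2),(0,0)), ((1,1),(2,1))]),
   ((0,2), [((0,0),(0,1)), ((1,2),(2,2)), ((1,1),(2,0))]),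
   ((1,0), [((1,1),(1,2)), ((2,0),(0,0))]),
   ((1,1), [((1,2),(1,0)), ((2,1),(0,1)), ((2,2),(0,0)), ((2,0),(0,2))]),
   ((1,2), [((1,0),(1,1)), ((2,2),(0,2))]),
   ((2,0), [((2,1),(2,2)), ((0,0),(1,0)), ((0,2),(1,1))]),
   ((2,1), [((2,2),(2,0)), ((0,1),(1,1))]),
   ((2,2), [((2,0),(2,1)), ((0,2),(1,2)), ((0,0),(1,1))])]

def evalua_tablero_alt (tablero : List (List Int)) (jugador : Int) : Int :=
  pvThrough.foldl
    (fun score item =>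
      if pvCell tablero item.1 = 0 then
        item.2.foldl
          (fun s pq =>
            if pvCell tablero pq.1 = jugador ∧ pvCell tablero pq.2 = jugador then s + 1
            else if pvCell tablero pq.1 = 3 - jugador ∧ pvCell tablero pq.2 = 3 - jugador then s - 1
            else s)
          score
      else score)
    0

-- ===== PRECONDITION & SPEC =====
-- Pre_: the Python A (and B) indexes rows 0,1,2 and columns 0,1,2 unconditionally, so it raises
-- IndexError unless the board has at least 3 rows whose first three rows each have at least 3 cells.
def Pre_evalua_tablero (tablero : List (List Int)) (jugador : Int) : Prop :=
  3 ≤ tablero.length ∧ 3 ≤ (tablero.getD 0 []).length ∧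
    3 ≤ (tablero.getD 1 []).length ∧ 3 ≤ (tablero.getD 2 []).length
instance (tablero : List (List Int)) (jugador : Int) : Decidable (Pre_evalua_tablero tablero jugador) := by unfold Pre_evalua_tablero; infer_instance

def pvWitness_evalua_tablero : List (List Int) × Int := ([[0,1,2],[2,0,1],[1,2,0]], 1)

def Spec_evalua_tablero (tablero : List (List Int)) (jugador : Int) (out : Int) : Prop := out = evalua_tablero_alt tablero jugador
instance (tablero : List (List Int)) (jugador : Int) (out : Int) : Decidable (Spec_evalua_tablero tablero jugador out) := by unfold Spec_evalua_tablero; infer_instance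

-- ===== CLAIM (what is proved, stated in full; the proofs are below) =====
def Claim_equal_evalua_tablero : Prop := ∀ (tablero : List (List Int)) (jugador : Int), Dom_evalua_tablero tablero jugador → Pre_evalua_tablero tablero jugador → Spec_evalua_tablero tablero jugador (evalua_tablero tablero jugador)

-- ===== LEMMAS AND PROOFS =====

-- the score a single (linea, combinacion) iteration of A contributes
def pvG (t : List (List Int)) (j : Int) (linea : List (Int × Int)) (comb : List Nat) : Int :=
  let c1 := linea.getD (comb.getD 0 0) (0,0)
  let c2 := linea.getD (comb.getD 1 0) (0,0)
  let c3 := linea.getD (comb.getD 2 0) (0,0)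
  if pvCell t c1 = pvCell t c2 ∧ pvCell t c2 = j ∧ pvCell t c3 = 0 then 1
  else if pvCell t c1 = pvCell t c2 ∧ pvCell t c2 = 3 - j ∧ pvCell t c3 = 0 then -1
  else 0

lemma stepA_diff (t : List (List Int)) (j : Int) (acc : Int × Int)
    (linea : List (Int × Int)) (comb : List Nat) :
    (pvStepA t j acc linea comb).1 - (pvStepA t j acc linea comb).2
      = acc.1 - acc.2 + pvG t j linea comb := by
  simp only [pvStepA, pvG]
  split_ifs <;> simp <;> ring

lemma foldl_diff {α : Type} (s : Int × Int → α → Int × Int) (g : α → Int)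
    (h : ∀ acc x, (s acc x).1 - (s acc x).2 = acc.1 - acc.2 + g x) :
    ∀ (L : List α) (acc : Int × Int),
      (L.foldl s acc).1 - (L.foldl s acc).2 = acc.1 - acc.2 + (L.map g).sum := by
  intro L
  induction L with
  | nil => intro acc; simp
  | cons x xs ih =>
      intro acc
      simp only [List.foldl_cons, List.map_cons, List.sum_cons, ih, h]
      ring

lemma foldl_add {α : Type} (s : Int → α → Int) (g : α → Int)
    (h : ∀ acc x, s acc x = acc + g x) :
    ∀ (L : List α) (acc : Int), L.foldl s acc = acc + (L.map g).sum := by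
  intro L
  induction L with
  | nil => intro acc; simp
  | cons x xs ih =>
      intro acc
      simp only [List.foldl_cons, List.map_cons, List.sum_cons, ih, h]
      ring

-- the score B's inner loop contributes for one pair of "other" cells
def pvCB (t : List (List Int)) (j : Int) (pq : (Int × Int) × (Int × Int)) : Int :=
  if pvCell t pq.1 = j ∧ pvCell t pq.2 = j then 1
  else if pvCell t pq.1 = 3 - j ∧ pvCell t pq.2 = 3 - j then -1
  else 0

-- the score B contributes for one cell with its list of lines
def pvOB (t : List (List Int)) (j : Int)
    (item : (Int × Int) × List ((Int × Int) × (Int × Int))) : Int :=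
  if pvCell t item.1 = 0 then (item.2.map (pvCB t j)).sum else 0

lemma evalua_tablero_eq_sum (t : List (List Int)) (j : Int) :
    evalua_tablero t j
      = (pvLineas.map (fun l => (pvCombinacionesUno.map (pvG t j l)).sum)).sum := by
  unfold evalua_tablero
  have h := foldl_diff
    (fun acc linea => pvCombinacionesUno.foldl
      (fun acc comb => pvStepA t j acc linea comb) acc)
    (fun linea => (pvCombinacionesUno.map (pvG t j linea)).sum)
    (fun acc linea => by
      have := foldl_diff (fun acc comb => pvStepA t j acc linea comb)
        (pvG t j linea) (fun acc comb => stepA_diff t j acc linea comb)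
        pvCombinacionesUno acc
      simpa using this)
    pvLineas (0, 0)
  simpa using h

lemma evalua_tablero_alt_eq_sum (t : List (List Int)) (j : Int) :
    evalua_tablero_alt t j = (pvThrough.map (pvOB t j)).sum := by
  unfold evalua_tablero_alt
  have h := foldl_add
    (fun score item =>
      if pvCell t item.1 = 0 then
        item.2.foldl
          (fun s pq =>
            if pvCell t pq.1 = j ∧ pvCell t pq.2 = j then s + 1
            else if pvCell t pq.1 = 3 - j ∧ pvCell t pq.2 = 3 - j then s - 1
            else s)
          score
      else score)
    (pvOB t j)
    (fun score item => by
      have hin := foldl_add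
        (fun s pq =>
          if pvCell t pq.1 = j ∧ pvCell t pq.2 = j then s + 1
          else if pvCell t pq.1 = 3 - j ∧ pvCell t pq.2 = 3 - j then s - 1
          else s)
        (pvCB t j)
        (fun s pq => by simp only [pvCB]; split_ifs <;> ring)
        item.2 score
      unfold pvOB
      by_cases hc : pvCell t item.1 = 0
      · simp [hc, hin]
      · simp [hc])
    pvThrough 0
  simpa using h

-- value-level atoms: one iteration of A, one inner iteration of B
def pvAtomA (j u v w : Int) : Int :=
  if u = v ∧ v = j ∧ w = 0 then 1
  else if u = v ∧ v = 3 - j ∧ w = 0 then -1 else 0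

def pvAtomB (j u v : Int) : Int :=
  if u = j ∧ v = j then 1
  else if u = 3 - j ∧ v = 3 - j then -1 else 0

lemma pvG_eval₁ (t : List (List Int)) (j : Int) (p q r : Int × Int) :
    pvG t j [p, q, r] [0,1,2] = pvAtomA j (pvCell t p) (pvCell t q) (pvCell t r) := rfl
lemma pvG_eval₂ (t : List (List Int)) (j : Int) (p q r : Int × Int) :
    pvG t j [p, q, r] [1,2,0] = pvAtomA j (pvCell t q) (pvCell t r) (pvCell t p) := rfl
lemma pvG_eval₃ (t : List (List Int)) (j : Int) (p q r : Int × Int) :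
    pvG t j [p, q, r] [2,0,1] = pvAtomA j (pvCell t r) (pvCell t p) (pvCell t q) := rfl

lemma pvCB_eval (t : List (List Int)) (j : Int) (p q : Int × Int) :
    pvCB t j (p, q) = pvAtomB j (pvCell t p) (pvCell t q) := rfl

lemma pvOB_eval (t : List (List Int)) (j : Int) (c : Int × Int)
    (lns : List ((Int × Int) × (Int × Int))) :
    pvOB t j (c, lns) = if pvCell t c = 0 then (lns.map (pvCB t j)).sum else 0 := rfl

-- one (u,v,w) iteration of A scores the same as the matching empty-cell-guarded atom of B
lemma atomA_eq (j u v w : Int) :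
    pvAtomA j u v w = if w = 0 then pvAtomB j u v else 0 := by
  unfold pvAtomA pvAtomB
  split_ifs <;> omega

lemma ite_add_split (c : Prop) [Decidable c] (x y : Int) :
    (if c then x + y else (0 : Int)) = (if c then x else 0) + (if c then y else 0) := by
  split_ifs <;> ring

-- ===== VERDICT (by name: the statement is the Claim_ definition above) =====
theorem evalua_tablero_spec : Claim_equal_evalua_tablero := by
  intro t j _ _
  unfold Spec_evalua_tablero
  rw [evalua_tablero_eq_sum, evalua_tablero_alt_eq_sum]
  simp only [pvLineas, pvCombinacionesUno, pvThrough, List.map_cons, List.map_nil,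
    List.sum_cons, List.sum_nil, add_zero,
    pvG_eval₁, pvG_eval₂, pvG_eval₃, pvOB_eval, pvCB_eval]
  simp only [atomA_eq, ite_add_split]
  ring
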